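-- pv_equiv track=rewrite | github.com/mbollmann/levenshtein | scripts/conv_norm.py | process_alignment_interspersed
-- ===== SOURCE A (Python) =====
-- BEGIN_TOKEN = "__BEGIN__"
--
-- def process_alignment_interspersed(alignment, epsilon):
--     input_token = BEGIN_TOKEN
--     output_token = epsilon
--     for (lhs, rhs) in alignment:
--         if lhs == epsilon:
--             if output_token == epsilon:
--                 output_token = rhs
--             else:
--                 output_token += rhs
--         else:
--             yield (input_token, output_token)
--             yield (lhs, rhs)
--             input_token, output_token = epsilon, epsilon
--     yield (input_token, output_token)
-- ===== SOURCE B (Python) =====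
-- BEGIN_TOKEN = "__BEGIN__"
--
-- def process_alignment_interspersed(alignment, epsilon):
--     # Phase 1: partition the alignment into anchor entries, each carrying the
--     # run of filler rhs values that precede it, plus the trailing filler run.
--     anchors = []          # list of ((lhs, rhs), fillers_before)
--     run = []              # current run of filler rhs values
--     for lhs, rhs in alignment:
--         if lhs == epsilon:
--             run.append(rhs)
--         else:
--             anchors.append(((lhs, rhs), run))
--             run = []
--
--     def accum(vals):
--         acc = epsilon
--         for v in vals:
--             acc = v if acc == epsilon else acc + v
--         return acc
--
--     # Phase 2: emit pending pair + anchor for each anchor, then the trailing pair.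
--     first = True
--     for anchor, fillers in anchors:
--         yield (BEGIN_TOKEN if first else epsilon, accum(fillers))
--         yield anchor
--         first = False
--     yield (BEGIN_TOKEN if first else epsilon, accum(run))
-- ===== Notes on version B (the rewrite author's own statement) =====
-- stated objective: alternative
-- what changed: B replaces A's single stateful generator loop with a two-phase decomposition: first partition the alignment into anchors each paired with its preceding run of filler rhs values (plus the trailing run), then emit pending/anchor pairs per group, folding each run with the exact sentinel accumulation rule.
import Mathlib
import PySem

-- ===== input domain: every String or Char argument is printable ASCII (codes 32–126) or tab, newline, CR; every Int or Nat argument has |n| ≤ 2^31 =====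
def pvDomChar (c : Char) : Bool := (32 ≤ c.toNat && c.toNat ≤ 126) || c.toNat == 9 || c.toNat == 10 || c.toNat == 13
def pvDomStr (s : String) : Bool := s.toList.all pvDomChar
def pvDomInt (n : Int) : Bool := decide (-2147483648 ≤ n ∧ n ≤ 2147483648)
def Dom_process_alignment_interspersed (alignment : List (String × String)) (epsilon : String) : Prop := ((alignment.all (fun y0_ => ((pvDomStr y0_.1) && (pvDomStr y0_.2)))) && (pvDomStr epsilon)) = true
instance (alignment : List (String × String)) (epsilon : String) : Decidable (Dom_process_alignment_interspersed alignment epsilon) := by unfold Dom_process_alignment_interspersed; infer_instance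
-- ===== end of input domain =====

-- B regroups the alignment in two passes (anchors with their preceding filler runs, then
-- emission) instead of A's single stateful generator loop; objective: alternative decomposition.
-- Both Pythons are generators; equivalence is about the list of yielded pairs.

-- ===== PORT A =====
-- literal transliteration of A's generator loop: state (input_token, output_token),
-- yields become cons cells
def pvLoopA (epsilon input_token output_token : String) : List (String × String) → List (String × String)
  | [] => [(input_token, output_token)]
  | p :: rest =>
    if p.1 == epsilon then
      if output_token == epsilon then pvLoopA epsilon input_token p.2 rest
      else pvLoopA epsilon input_token (output_token ++ p.2) rest
    else
      (input_token, output_token) :: p :: pvLoopA epsilon epsilon epsilon rest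

def process_alignment_interspersed (alignment : List (String × String)) (epsilon : String) : List (String × String) :=
  pvLoopA epsilon "__BEGIN__" epsilon alignment

-- ===== PORT B =====
-- phase-1 loop body of Source B: collect (anchor, fillers-before-it) pairs and the trailing run
def pvGroupStep (epsilon : String)
    (st : List ((String × String) × List String) × List String) (p : String × String) :
    List ((String × String) × List String) × List String :=
  if p.1 == epsilon then (st.1, st.2 ++ [p.2])
  else (st.1 ++ [(p, st.2)], [])

-- Source B's accum helper (the exact sentinel rule, as a left fold)
def pvAccum (epsilon : String) (vals : List String) : String :=
  vals.foldl (fun acc v => if acc == epsilon then v else acc ++ v) epsilon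

-- phase-2 loop body of Source B: emit the pending pair and the anchor
def pvEmitStep (epsilon : String)
    (st : List (String × String) × Bool) (ap : (String × String) × List String) :
    List (String × String) × Bool :=
  (st.1 ++ [((if st.2 then "__BEGIN__" else epsilon), pvAccum epsilon ap.2), ap.1], false)

def process_alignment_interspersed_alt (alignment : List (String × String)) (epsilon : String) : List (String × String) :=
  let g := alignment.foldl (pvGroupStep epsilon) ([], [])
  let e := g.1.foldl (pvEmitStep epsilon) ([], true)
  e.1 ++ [((if e.2 then "__BEGIN__" else epsilon), pvAccum epsilon g.2)]

-- ===== PRECONDITION & SPEC =====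
def Spec_process_alignment_interspersed (alignment : List (String × String)) (epsilon : String) (out : List (String × String)) : Prop := out = process_alignment_interspersed_alt alignment epsilon
instance (alignment : List (String × String)) (epsilon : String) (out : List (String × String)) : Decidable (Spec_process_alignment_interspersed alignment epsilon out) := by unfold Spec_process_alignment_interspersed; infer_instance

-- ===== CLAIM (what is proved, stated in full; the proofs are below) =====
def Claim_equal_process_alignment_interspersed : Prop := ∀ (alignment : List (String × String)) (epsilon : String), Dom_process_alignment_interspersed alignment epsilon → Spec_process_alignment_interspersed alignment epsilon (process_alignment_interspersed alignment epsilon)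

-- ===== LEMMAS AND PROOFS =====

-- proof-side: B's emission phase applied to a (anchors, trailing-run) pair, with the
-- "first" flag generalized
def pvEmitAll (epsilon : String) (first : Bool)
    (g : List ((String × String) × List String) × List String) : List (String × String) :=
  let e := g.1.foldl (pvEmitStep epsilon) ([], first)
  e.1 ++ [((if e.2 then "__BEGIN__" else epsilon), pvAccum epsilon g.2)]

theorem pvGroup_prefix (epsilon : String) (l : List (String × String))
    (as0 as : List ((String × String) × List String)) (run : List String) :
    l.foldl (pvGroupStep epsilon) (as0 ++ as, run)
      = (as0 ++ (l.foldl (pvGroupStep epsilon) (as, run)).1,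
         (l.foldl (pvGroupStep epsilon) (as, run)).2) := by
  induction l generalizing as run with
  | nil => simp
  | cons p rest ih =>
    simp only [List.foldl_cons, pvGroupStep]
    by_cases h : p.1 == epsilon
    · simp [h, ih]
    · simpa [h, List.append_assoc] using ih (as ++ [(p, run)]) []

theorem pvEmit_prefix (epsilon : String) (as : List ((String × String) × List String))
    (out0 out : List (String × String)) (first : Bool) :
    as.foldl (pvEmitStep epsilon) (out0 ++ out, first)
      = (out0 ++ (as.foldl (pvEmitStep epsilon) (out, first)).1,
         (as.foldl (pvEmitStep epsilon) (out, first)).2) := by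
  induction as generalizing out first with
  | nil => simp
  | cons a rest ih =>
    simp only [List.foldl_cons, pvEmitStep]
    simpa [List.append_assoc] using
      ih (out ++ [((if first then "__BEGIN__" else epsilon), pvAccum epsilon a.2), a.1]) false

theorem pvEmitAll_cons (epsilon : String) (first : Bool)
    (a : (String × String) × List String)
    (as : List ((String × String) × List String)) (run : List String) :
    pvEmitAll epsilon first (a :: as, run)
      = ((if first then "__BEGIN__" else epsilon), pvAccum epsilon a.2) :: a.1
          :: pvEmitAll epsilon false (as, run) := by
  simp only [pvEmitAll, List.foldl_cons, pvEmitStep]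
  have := pvEmit_prefix epsilon as
    [((if first then "__BEGIN__" else epsilon), pvAccum epsilon a.2), a.1] [] false
  simp at this
  simp [this]

theorem pvAccum_snoc (epsilon : String) (run : List String) (v : String) :
    pvAccum epsilon (run ++ [v])
      = (if pvAccum epsilon run == epsilon then v else pvAccum epsilon run ++ v) := by
  simp [pvAccum, List.foldl_append]

theorem pvMain (epsilon : String) (l : List (String × String))
    (run : List String) (first : Bool) :
    pvLoopA epsilon (if first then "__BEGIN__" else epsilon) (pvAccum epsilon run) l
      = pvEmitAll epsilon first (l.foldl (pvGroupStep epsilon) ([], run)) := by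
  induction l generalizing run first with
  | nil => simp [pvLoopA, pvEmitAll]
  | cons p rest ih =>
    simp only [pvLoopA, List.foldl_cons, pvGroupStep]
    by_cases h : p.1 == epsilon
    · by_cases h2 : pvAccum epsilon run == epsilon
      · have := ih (run ++ [p.2]) first
        rw [pvAccum_snoc, h2, if_pos rfl] at this
        simp [h, h2, this]
      · have hthis := ih (run ++ [p.2]) first
        rw [pvAccum_snoc] at hthis
        simp [h2] at hthis
        simp [h, h2, hthis]
    · have hg := pvGroup_prefix epsilon rest [(p, run)] [] []
      simp at hg
      simpa [h, hg, pvEmitAll_cons, pvAccum] using ih [] false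

-- ===== VERDICT (by name: the statement is the Claim_ definition above) =====
theorem process_alignment_interspersed_spec : Claim_equal_process_alignment_interspersed := by
  intro alignment epsilon _
  show process_alignment_interspersed alignment epsilon
      = process_alignment_interspersed_alt alignment epsilon
  have := pvMain epsilon alignment [] true
  simpa [process_alignment_interspersed, process_alignment_interspersed_alt,
    pvEmitAll, pvAccum] using this
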